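-- pv_equiv track=rewrite | github.com/mirsamantajbakhsh/OnionHarvester-Server | dispatcher/views.py | __address_generator
-- ===== SOURCE A (Python) =====
-- def __address_generator(last_address, range_limit):
--     start_address = __next_address_generator(last_address)
--     end_address = last_address
--     for i in range(range_limit):
--         end_address = __next_address_generator(end_address)
--     address_range = {
--         'start': start_address,
--         'end': end_address,
--     }
--     return address_range
--
-- def __next_address_generator(last_address):
--     last_address = list(last_address)
--     chars_list = ['a', 'b', 'c', 'd', 'e', 'f', 'g', 'h', 'i', 'j', 'k', 'l', 'm', 'n', 'o', 'p', 'q', 'r', 's', 't',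
--                   'u', 'v', 'w', 'x', 'y', 'z', '2', '3', '4', '5', '6', '7']
--     for i, x in reversed(list(enumerate(last_address))):
--         if x == '7':
--             last_address[i] = 'a'
--         else:
--             last_address[i] = chars_list[chars_list.index(x) + 1]
--             break
--     return last_address
-- ===== SOURCE B (Python) =====
-- ALPHABET = 'abcdefghijklmnopqrstuvwxyz234567'
--
-- def _to_int(s):
--     v = 0
--     for c in s:
--         v = v * 32 + ALPHABET.index(c)
--     return v
--
-- def _from_int(v, length):
--     digits = []
--     for _ in range(length):
--         v, r = divmod(v, 32)
--         digits.append(ALPHABET[r])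
--     digits.reverse()
--     return digits
--
-- def __address_generator(last_address, range_limit):
--     length = len(last_address)
--     m = 32 ** length
--     v = _to_int(last_address)
--     return {
--         'start': _from_int((v + 1) % m, length),
--         'end': _from_int((v + range_limit) % m, length),
--     }
-- ===== Notes on version B (the rewrite author's own statement) =====
-- stated objective: faster
-- what changed: A applies a character-by-character base-32 successor range_limit+1 times; B converts the address to an integer once, computes (v+1) mod 32**len and (v+range_limit) mod 32**len, and converts back, removing the range_limit-fold loop.
-- outside the precondition, e.g. on __address_generator('Za', 1): A returns {'start': ['Z', 'b'], 'end': ['Z', 'b']}, B raises ValueError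
import Mathlib
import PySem

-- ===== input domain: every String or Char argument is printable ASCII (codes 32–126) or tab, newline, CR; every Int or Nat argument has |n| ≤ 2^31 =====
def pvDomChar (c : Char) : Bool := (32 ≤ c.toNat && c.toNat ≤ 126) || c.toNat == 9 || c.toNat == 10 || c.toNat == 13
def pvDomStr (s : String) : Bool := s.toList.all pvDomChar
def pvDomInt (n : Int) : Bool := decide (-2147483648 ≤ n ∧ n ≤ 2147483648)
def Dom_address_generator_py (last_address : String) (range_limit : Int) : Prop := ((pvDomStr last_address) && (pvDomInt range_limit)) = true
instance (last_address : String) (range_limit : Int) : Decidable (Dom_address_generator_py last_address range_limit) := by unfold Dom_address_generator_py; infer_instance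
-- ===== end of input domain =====

-- B replaces A's range_limit-fold repetition of the char-by-char successor by one base-32
-- integer conversion, a single modular addition, and one conversion back (objective: faster).

-- the base-32 onion alphabet, shared reference constant (used by Pre_ and by the proofs)
def base32Chars : List Char :=
  ['a','b','c','d','e','f','g','h','i','j','k','l','m','n','o','p','q','r','s','t',
   'u','v','w','x','y','z','2','3','4','5','6','7']

-- ===== PORT A =====
def charsListA : List String :=
  ["a","b","c","d","e","f","g","h","i","j","k","l","m","n","o","p","q","r","s","t",
   "u","v","w","x","y","z","2","3","4","5","6","7"]

-- the 'for i, x in reversed(list(enumerate(last_address)))' loop with its break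
def nextAddrGo : List String → List (Int × String) → List String
  | arr, [] => arr
  | arr, (i, x) :: rest =>
    if x == "7" then nextAddrGo (PySem.List.pySetD arr i "a") rest
    else PySem.List.pySetD arr i
      (PySem.List.pyGetD charsListA ((((PySem.List.index? charsListA x).getD 0 : Nat) : Int) + 1) "")

def nextAddrA (arr : List String) : List String :=
  nextAddrGo arr (PySem.List.enumerate arr 0).reverse

def address_generator_py (last_address : String) (range_limit : Int) : List (String × List String) :=
  -- list(last_address): the string as a list of one-character strings
  let la := last_address.toList.map (fun c => String.ofList [c])
  let start_address := nextAddrA la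
  let end_address := (PySem.List.pyRange 0 range_limit 1).foldl (fun e _ => nextAddrA e) la
  [("start", start_address), ("end", end_address)]

-- ===== PORT B =====
-- ALPHABET = 'abcdefghijklmnopqrstuvwxyz234567', as the list of its one-character strings
def alphabetB : List String :=
  "abcdefghijklmnopqrstuvwxyz234567".toList.map (fun c => String.ofList [c])

-- ALPHABET.index(c) for a single character c: exact as the index of c in the char list
def toIntB (s : String) : Int :=
  s.toList.foldl (fun v c => v * 32 + (((PySem.List.index? base32Chars c).getD 0 : Nat) : Int)) 0

-- the 'for _ in range(length): v, r = divmod(v, 32); digits.append(ALPHABET[r])' loop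
def fromLoopB : Int → Nat → List String
  | _, 0 => []
  | v, (n+1) =>
    PySem.List.pyGetD alphabetB (PySem.Int.mod v 32) "" :: fromLoopB (PySem.Int.floordiv v 32) n

def fromIntB (v : Int) (n : Nat) : List String := (fromLoopB v n).reverse

def address_generator_py_alt (last_address : String) (range_limit : Int) : List (String × List String) :=
  let L := last_address.toList.length   -- len(last_address)
  let m : Int := (32 : Int) ^ L         -- 32 ** length
  let v := toIntB last_address
  [("start", fromIntB (PySem.Int.mod (v + 1) m) L),
   ("end", fromIntB (PySem.Int.mod (v + range_limit) m) L)]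

-- ===== PRECONDITION & SPEC =====
-- Pre_ excludes range_limit ≤ 0, where A's 'end' is the input string itself rather than a list of
-- characters (not a value of the declared type), and addresses with a character outside the base-32
-- alphabet, where A raises ValueError whenever the carry scan reaches that character (and otherwise
-- returns a value carrying the foreign character, which B's integer conversion naturally rejects).
def Pre_address_generator_py (last_address : String) (range_limit : Int) : Prop :=
  1 ≤ range_limit ∧ last_address.toList.all (fun c => decide (c ∈ base32Chars)) = true
instance (last_address : String) (range_limit : Int) : Decidable (Pre_address_generator_py last_address range_limit) := by unfold Pre_address_generator_py; infer_instance

def pvWitness_address_generator_py : String × Int := ("az7", 5)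

def Spec_address_generator_py (last_address : String) (range_limit : Int) (out : List (String × List String)) : Prop := out = address_generator_py_alt last_address range_limit
instance (last_address : String) (range_limit : Int) (out : List (String × List String)) : Decidable (Spec_address_generator_py last_address range_limit out) := by unfold Spec_address_generator_py; infer_instance

-- ===== CLAIM (what is proved, stated in full; the proofs are below) =====
def Claim_equal_address_generator_py : Prop := ∀ (last_address : String) (range_limit : Int), Dom_address_generator_py last_address range_limit → Pre_address_generator_py last_address range_limit → Spec_address_generator_py last_address range_limit (address_generator_py last_address range_limit)

-- ===== LEMMAS AND PROOFS =====

-- proof-side vocabulary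
def singS (l : List Char) : List String := l.map (fun c => String.ofList [c])
def idxC (c : Char) : Nat := base32Chars.idxOf c
def digC (n : Nat) : Char := base32Chars.getD n 'a'
def valNat (l : List Char) : Nat := l.foldl (fun v c => v * 32 + idxC c) 0
-- low-order-first digit list of v, n digits
def fromC : Nat → Nat → List Char
  | _, 0 => []
  | v, n+1 => digC (v % 32) :: fromC (v / 32) n
-- successor with carry, on the reversed (low-order-first) digit list
def succR : List Char → List Char
  | [] => []
  | c :: r => if c = '7' then 'a' :: succR r else digC (idxC c + 1) :: r

-- finite alphabet facts
set_option maxRecDepth 2000 in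
lemma F1 : ∀ c ∈ base32Chars, digC (idxC c) = c ∧ idxC c < 32 ∧ (c = '7' ↔ idxC c = 31)
    ∧ (PySem.List.index? base32Chars c).getD 0 = idxC c := by
  intro c hc; fin_cases hc <;> decide

set_option maxRecDepth 2000 in
lemma F2 : ∀ r : Nat, r < 32 → digC r ∈ base32Chars ∧ idxC (digC r) = r ∧ (digC r = '7' ↔ r = 31) := by
  intro r hr; interval_cases r <;> decide

set_option maxRecDepth 2000 in
lemma F3 : ∀ c ∈ base32Chars, c ≠ '7' →
    PySem.List.pyGetD charsListA ((((PySem.List.index? charsListA (String.ofList [c])).getD 0 : Nat) : Int) + 1) ""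
      = String.ofList [digC (idxC c + 1)] := by
  intro c hc; fin_cases hc <;> decide

set_option maxRecDepth 2000 in
lemma F4 : ∀ r : Nat, r < 32 → PySem.List.pyGetD alphabetB ((r : Nat) : Int) "" = String.ofList [digC r] := by
  intro r hr; interval_cases r <;> decide

set_option maxRecDepth 2000 in
lemma F5 : ∀ c ∈ base32Chars, String.ofList [c] = "7" ↔ c = '7' := by
  intro c hc; fin_cases hc <;> decide

lemma valNat_append (l : List Char) (c : Char) : valNat (l ++ [c]) = valNat l * 32 + idxC c := by
  simp [valNat]

lemma valNat_lt (l : List Char) (h : ∀ c ∈ l, c ∈ base32Chars) : valNat l < 32 ^ l.length := by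
  induction l using List.reverseRecOn with
  | nil => simp [valNat]
  | append_singleton l c ih =>
    have hc := (F1 c (h c (by simp))).2.1
    have hl := ih (fun d hd => h d (by simp [hd]))
    rw [valNat_append]
    simp only [List.length_append, List.length_singleton, pow_succ]
    omega

lemma fromC_valNat (l : List Char) (h : ∀ c ∈ l, c ∈ base32Chars) :
    fromC (valNat l) l.length = l.reverse := by
  induction l using List.reverseRecOn with
  | nil => simp [valNat, fromC]
  | append_singleton l c ih =>
    have hc := F1 c (h c (by simp))
    have hl := ih (fun d hd => h d (by simp [hd]))
    rw [valNat_append]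
    simp only [List.length_append, List.length_singleton, List.reverse_append, List.reverse_singleton]
    show fromC (valNat l * 32 + idxC c) (l.length + 1) = c :: l.reverse
    rw [fromC]
    have h1 : (valNat l * 32 + idxC c) % 32 = idxC c := by omega
    have h2 : (valNat l * 32 + idxC c) / 32 = valNat l := by omega
    rw [h1, h2, hc.1, hl]

lemma fromC_props : ∀ (n v : Nat), v < 32 ^ n →
    valNat ((fromC v n).reverse) = v ∧ (∀ c ∈ fromC v n, c ∈ base32Chars) ∧ (fromC v n).length = n := by
  intro n
  induction n with
  | zero => intro v hv; simp [fromC, valNat]; omega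
  | succ n ih =>
    intro v hv
    have hdiv : v / 32 < 32 ^ n := by
      rw [Nat.div_lt_iff_lt_mul (by norm_num)]
      calc v < 32 ^ (n+1) := hv
        _ = 32 ^ n * 32 := by ring
    obtain ⟨ihv, ihmem, ihlen⟩ := ih (v / 32) hdiv
    have hr := F2 (v % 32) (by omega)
    refine ⟨?_, ?_, ?_⟩
    · rw [fromC]
      simp only [List.reverse_cons]
      rw [valNat_append, ihv, hr.2.1]
      omega
    · intro c hc
      rw [fromC] at hc
      rcases List.mem_cons.mp hc with h | h
      · rw [h]; exact hr.1
      · exact ihmem c h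
    · rw [fromC]; simp [ihlen]

lemma succR_fromC : ∀ (n v : Nat), v < 32 ^ n → succR (fromC v n) = fromC ((v + 1) % 32 ^ n) n := by
  intro n
  induction n with
  | zero => intro v hv; simp [fromC, succR]
  | succ n ih =>
    intro v hv
    have hr := F2 (v % 32) (by omega)
    rw [fromC, succR]
    by_cases h31 : v % 32 = 31
    · rw [if_pos (hr.2.2.mpr h31)]
      have hdiv : v / 32 < 32 ^ n := by
        rw [Nat.div_lt_iff_lt_mul (by norm_num)]
        calc v < 32 ^ (n+1) := hv
          _ = 32 ^ n * 32 := by ring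
      rw [ih (v / 32) hdiv]
      have hv1 : v + 1 = 32 * (v / 32 + 1) := by omega
      have hm : (v + 1) % 32 ^ (n+1) = 32 * ((v / 32 + 1) % 32 ^ n) := by
        rw [hv1, pow_succ, mul_comm (32 ^ n) 32, Nat.mul_mod_mul_left]
      rw [hm, fromC]
      have h1 : 32 * ((v / 32 + 1) % 32 ^ n) % 32 = 0 := by omega
      have h2 : 32 * ((v / 32 + 1) % 32 ^ n) / 32 = (v / 32 + 1) % 32 ^ n := by omega
      rw [h1, h2]
      rfl
    · rw [if_neg (fun hh => h31 (hr.2.2.mp hh))]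
      have hlt : v + 1 < 32 ^ (n+1) := by
        have : v % 32 < 31 := by omega
        have h32 : 32 ∣ 32 ^ (n+1) := dvd_pow_self 32 (Nat.succ_ne_zero n)
        omega
      rw [Nat.mod_eq_of_lt hlt, fromC, hr.2.1]
      have h1 : (v + 1) % 32 = v % 32 + 1 := by omega
      have h2 : (v + 1) / 32 = v / 32 := by omega
      rw [h1, h2]

lemma set_at_len {α : Type} (a : List α) (x : α) (s : List α) (v : α) :
    (a ++ x :: s).set a.length v = a ++ v :: s := by
  induction a with
  | nil => simp
  | cons y a ih => simp [ih]

lemma nextAddrGo_spec (l : List Char) (s : List String) (h : ∀ c ∈ l, c ∈ base32Chars) :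
    nextAddrGo (singS l ++ s) (PySem.List.enumerate (singS l) 0).reverse
      = singS ((succR l.reverse).reverse) ++ s := by
  induction l using List.reverseRecOn generalizing s with
  | nil => simp [singS, PySem.List.enumerate_nil, nextAddrGo, succR]
  | append_singleton l x ih =>
    have hx : x ∈ base32Chars := h x (by simp)
    have hl : ∀ c ∈ l, c ∈ base32Chars := fun d hd => h d (by simp [hd])
    have hsing : singS (l ++ [x]) = singS l ++ [String.ofList [x]] := by simp [singS]
    have hen : (PySem.List.enumerate (singS (l ++ [x])) 0).reverse
        = ((l.length : Int), String.ofList [x]) :: (PySem.List.enumerate (singS l) 0).reverse := by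
      rw [hsing, PySem.List.enumerate_append]
      simp [PySem.List.enumerate_cons, PySem.List.enumerate_nil, singS]
    rw [hen, hsing]
    by_cases h7 : x = '7'
    · have heq : (String.ofList [x] == "7") = true := by
        simp [(F5 x hx).mpr h7]
      rw [List.append_assoc]
      show nextAddrGo (singS l ++ ([String.ofList [x]] ++ s)) _ = _
      rw [nextAddrGo, heq]
      have hset : PySem.List.pySetD (singS l ++ ([String.ofList [x]] ++ s)) ((l.length : Int)) "a"
          = singS l ++ ("a" :: s) := by
        rw [PySem.List.pySetD_natCast]
        have : (singS l).length = l.length := by simp [singS]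
        rw [← this]
        exact set_at_len (singS l) (String.ofList [x]) s "a"
      rw [hset, ih ("a" :: s) hl]
      have : succR ((l ++ [x]).reverse) = 'a' :: succR l.reverse := by
        simp [h7, succR]
      rw [this]
      simp [singS]
    · have heq : (String.ofList [x] == "7") = false := by
        simp only [beq_eq_false_iff_ne, ne_eq]
        exact fun hh => h7 ((F5 x hx).mp hh)
      rw [List.append_assoc]
      show nextAddrGo (singS l ++ ([String.ofList [x]] ++ s)) _ = _
      rw [nextAddrGo, heq]
      simp only [Bool.false_eq_true, if_false]
      rw [F3 x hx h7]
      have hlen : (singS l).length = l.length := by simp [singS]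
      have hset : PySem.List.pySetD (singS l ++ ([String.ofList [x]] ++ s)) ((l.length : Int))
          (String.ofList [digC (idxC x + 1)]) = singS l ++ (String.ofList [digC (idxC x + 1)] :: s) := by
        rw [PySem.List.pySetD_natCast, ← hlen]
        exact set_at_len (singS l) (String.ofList [x]) s _
      rw [hset]
      have : succR ((l ++ [x]).reverse) = digC (idxC x + 1) :: l.reverse := by
        simp [succR, h7]
      rw [this]
      simp [singS]

lemma nextAddrA_spec (l : List Char) (h : ∀ c ∈ l, c ∈ base32Chars) :
    nextAddrA (singS l) = singS ((fromC ((valNat l + 1) % 32 ^ l.length) l.length).reverse) := by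
  have := nextAddrGo_spec l [] h
  simp only [List.append_nil] at this
  rw [nextAddrA, this]
  rw [show l.reverse = fromC (valNat l) l.length from (fromC_valNat l h).symm]
  rw [succR_fromC l.length (valNat l) (valNat_lt l h)]

lemma iterate_spec (l : List Char) (h : ∀ c ∈ l, c ∈ base32Chars) (k : Nat) :
    (PySem.List.pyRange 0 (k : Int) 1).foldl (fun e _ => nextAddrA e) (singS l)
      = singS ((fromC ((valNat l + k) % 32 ^ l.length) l.length).reverse) := by
  induction k with
  | zero =>
    have h0 : PySem.List.pyRange 0 ((0 : Nat) : Int) 1 = [] :=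
      PySem.List.pyRange_one_eq_nil (by simp)
    rw [h0]
    simp only [List.foldl_nil, Nat.add_zero]
    rw [Nat.mod_eq_of_lt (valNat_lt l h), fromC_valNat l h, List.reverse_reverse]
  | succ k ih =>
    have hsplit : PySem.List.pyRange 0 ((k + 1 : Nat) : Int) 1
        = PySem.List.pyRange 0 (k : Int) 1 ++ [(k : Int)] := by
      rw [show ((k + 1 : Nat) : Int) = (k : Int) + 1 by push_cast; ring]
      exact PySem.List.pyRange_one_succ_right (by positivity)
    rw [hsplit, List.foldl_append, ih]
    simp only [List.foldl_cons, List.foldl_nil]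
    set w := (valNat l + k) % 32 ^ l.length with hw
    have hwlt : w < 32 ^ l.length := Nat.mod_lt _ (by positivity)
    obtain ⟨hv, hmem, hlen⟩ := fromC_props l.length w hwlt
    have hmem' : ∀ c ∈ (fromC w l.length).reverse, c ∈ base32Chars := by
      intro c hc; exact hmem c (List.mem_reverse.mp hc)
    rw [nextAddrA_spec _ hmem']
    rw [List.length_reverse, hlen, hv]
    have : (w + 1) % 32 ^ l.length = (valNat l + (k + 1)) % 32 ^ l.length := by
      rw [hw, Nat.mod_add_mod, Nat.add_assoc]
    rw [this]

lemma toIntB_spec (l : List Char) (h : ∀ c ∈ l, c ∈ base32Chars) : ∀ acc : Nat,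
    l.foldl (fun v c => v * 32 + (((PySem.List.index? base32Chars c).getD 0 : Nat) : Int)) ((acc : Nat) : Int)
      = ((l.foldl (fun v c => v * 32 + idxC c) acc : Nat) : Int) := by
  induction l with
  | nil => intro acc; simp
  | cons c l ih =>
    intro acc
    have hc := (F1 c (h c (by simp))).2.2.2
    simp only [List.foldl_cons, hc]
    have : ((acc : Nat) : Int) * 32 + ((idxC c : Nat) : Int) = (((acc * 32 + idxC c : Nat) : Nat) : Int) := by
      push_cast; ring
    rw [this]
    exact ih (fun d hd => h d (by simp [hd])) (acc * 32 + idxC c)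

lemma fromLoopB_spec : ∀ (n : Nat) (v : Nat), fromLoopB ((v : Nat) : Int) n = singS (fromC v n) := by
  intro n
  induction n with
  | zero => intro v; simp [fromLoopB, fromC, singS]
  | succ n ih =>
    intro v
    rw [fromLoopB, fromC]
    rw [show (32 : Int) = ((32 : Nat) : Int) from rfl]
    rw [PySem.Int.mod_natCast, PySem.Int.floordiv_natCast, ih (v / 32)]
    rw [F4 (v % 32) (by omega)]
    simp [singS]

-- ===== VERDICT (by name: the statement is the Claim_ definition above) =====
theorem address_generator_py_spec : Claim_equal_address_generator_py := by
  intro last_address range_limit _hdom hpre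
  obtain ⟨hrl, hvalb⟩ := hpre
  have hval : ∀ c ∈ last_address.toList, c ∈ base32Chars := by
    intro c hc
    exact of_decide_eq_true (List.all_eq_true.mp hvalb c hc)
  unfold Spec_address_generator_py address_generator_py address_generator_py_alt
  set l := last_address.toList with hl
  have hsing : l.map (fun c => String.ofList [c]) = singS l := rfl
  have hv := toIntB_spec l hval 0
  simp only [Nat.cast_zero] at hv
  have htoInt : toIntB last_address = ((valNat l : Nat) : Int) := by
    unfold toIntB valNat
    rw [← hl]
    exact hv
  have hm : (32 : Int) ^ l.length = (((32 ^ l.length : Nat) : Nat) : Int) := by push_cast; ring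
  have hmod1 : PySem.Int.mod (toIntB last_address + 1) ((32 : Int) ^ l.length)
      = (((valNat l + 1) % 32 ^ l.length : Nat) : Int) := by
    rw [htoInt, hm, show ((valNat l : Nat) : Int) + 1 = (((valNat l + 1 : Nat) : Nat) : Int) by push_cast; ring]
    exact PySem.Int.mod_natCast _ _
  have hrk : range_limit = ((range_limit.toNat : Nat) : Int) := by omega
  have hmod2 : PySem.Int.mod (toIntB last_address + range_limit) ((32 : Int) ^ l.length)
      = (((valNat l + range_limit.toNat) % 32 ^ l.length : Nat) : Int) := by
    rw [htoInt, hm, hrk,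
      show ((valNat l : Nat) : Int) + ((range_limit.toNat : Nat) : Int)
        = (((valNat l + range_limit.toNat : Nat) : Nat) : Int) by push_cast; ring]
    exact PySem.Int.mod_natCast _ _
  simp only [hsing, hmod1, hmod2]
  unfold fromIntB
  rw [fromLoopB_spec, fromLoopB_spec]
  rw [nextAddrA_spec l hval]
  rw [hrk, iterate_spec l hval range_limit.toNat]
  simp only [singS, List.map_reverse, Int.toNat_natCast]
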